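-- pv_equiv track=rewrite | github.com/WhiteDreama/Intent-GAT | metadrive/scripts/run_packet_loss_sweep.py | build_field_order
-- ===== SOURCE A (Python) =====
-- from typing import Any, Dict, Iterable, List, Optional, Sequence, Tuple
--
-- BASE_FIELD_ORDER: List[str] = [
--     "method",
--     "rho",
--     "rho_dir",
--     "model_type",
--     "model_path",
--     "n_episodes",
--     "start_seed",
--     "num_agents",
--     "n_finished",
--     "n_success",
--     "sr_mean",
--     "sr_std",
--     "sr_se",
--     "cr_mean",
--     "oor_mean",
--     "steps_mean",
--     "risk.avg_min_ttc_s",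
--     "risk.high_risk_ttc_rate",
--     "risk.avg_min_dist_m",
--     "risk.high_risk_dist_rate",
--     "returncode",
--     "runtime_sec",
--     "summary_json",
--     "status_json",
--     "parse_error",
-- ]
--
-- def build_field_order(rows: Sequence[Dict[str, Any]]) -> List[str]:
--     seen = set(BASE_FIELD_ORDER)
--     extras: List[str] = []
--     for row in rows:
--         for key in row.keys():
--             if key not in seen:
--                 extras.append(key)
--                 seen.add(key)
--     risk_extras = sorted([key for key in extras if key.startswith("risk.") and key not in BASE_FIELD_ORDER])
--     other_extras = sorted([key for key in extras if not key.startswith("risk.") and key not in BASE_FIELD_ORDER])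
--     return BASE_FIELD_ORDER + risk_extras + other_extras
-- ===== SOURCE B (Python) =====
-- from typing import Any, Dict, List, Sequence
--
-- BASE_FIELD_ORDER: List[str] = [
--     "method",
--     "rho",
--     "rho_dir",
--     "model_type",
--     "model_path",
--     "n_episodes",
--     "start_seed",
--     "num_agents",
--     "n_finished",
--     "n_success",
--     "sr_mean",
--     "sr_std",
--     "sr_se",
--     "cr_mean",
--     "oor_mean",
--     "steps_mean",
--     "risk.avg_min_ttc_s",
--     "risk.high_risk_ttc_rate",
--     "risk.avg_min_dist_m",
--     "risk.high_risk_dist_rate",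
--     "returncode",
--     "runtime_sec",
--     "summary_json",
--     "status_json",
--     "parse_error",
-- ]
--
-- def build_field_order(rows: Sequence[Dict[str, Any]]) -> List[str]:
--     # Sort the raw key multiset once, then a single scan dedupes adjacent
--     # duplicates and partitions the new keys by prefix.
--     base = set(BASE_FIELD_ORDER)
--     keys = sorted(k for row in rows for k in row)
--     risk: List[str] = []
--     other: List[str] = []
--     prev = None
--     for k in keys:
--         if k != prev and k not in base:
--             (risk if k.startswith("risk.") else other).append(k)
--         prev = k
--     return BASE_FIELD_ORDER + risk + other
-- ===== Notes on version B (the rewrite author's own statement) =====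
-- stated objective: alternative
-- what changed: A dedupes keys in first-seen order with a seen-set and extras list, then partitions and sorts the extras in two filtered passes; B instead sorts the raw key multiset (duplicates included) once and makes a single scan that drops adjacent duplicates and base keys while partitioning by the 'risk.' prefix; correct because sorting makes equal keys adjacent and the final order sorted anyway.
import Mathlib
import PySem

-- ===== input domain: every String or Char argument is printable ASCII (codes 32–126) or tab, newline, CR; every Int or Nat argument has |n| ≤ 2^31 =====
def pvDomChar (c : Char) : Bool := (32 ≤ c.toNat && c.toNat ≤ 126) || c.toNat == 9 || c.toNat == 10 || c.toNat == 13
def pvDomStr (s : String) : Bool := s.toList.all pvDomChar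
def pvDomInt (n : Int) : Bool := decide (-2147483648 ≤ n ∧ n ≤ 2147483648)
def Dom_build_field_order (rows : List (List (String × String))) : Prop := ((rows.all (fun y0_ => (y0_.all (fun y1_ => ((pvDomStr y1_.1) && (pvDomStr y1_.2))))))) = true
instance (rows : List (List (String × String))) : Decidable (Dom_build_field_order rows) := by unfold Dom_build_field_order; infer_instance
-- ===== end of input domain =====

-- B sorts the raw key multiset once and dedupes/partitions the new keys in a single scan over
-- the sorted list, instead of A's first-seen set dedup followed by two filtered sorts; objective: alternative.

def BASE_FIELD_ORDER : List String :=
  ["method", "rho", "rho_dir", "model_type", "model_path", "n_episodes", "start_seed",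
   "num_agents", "n_finished", "n_success", "sr_mean", "sr_std", "sr_se", "cr_mean",
   "oor_mean", "steps_mean", "risk.avg_min_ttc_s", "risk.high_risk_ttc_rate",
   "risk.avg_min_dist_m", "risk.high_risk_dist_rate", "returncode", "runtime_sec",
   "summary_json", "status_json", "parse_error"]

-- ===== PORT A =====
def build_field_order (rows : List (List (String × String))) : List String :=
  let st := rows.foldl
    (fun (st : PySem.Set String × List String) row =>
      (row.map Prod.fst).foldl
        (fun st key =>
          if PySem.Set.contains st.1 key then st
          else (PySem.Set.add st.1 key, st.2 ++ [key]))
        st)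
    (PySem.Set.ofList BASE_FIELD_ORDER, [])
  let extras := st.2
  let risk_extras := PySem.List.sorted
    (extras.filter (fun key => PySem.Str.startswith key "risk." && !(BASE_FIELD_ORDER.contains key)))
    (fun x => x) false
  let other_extras := PySem.List.sorted
    (extras.filter (fun key => !PySem.Str.startswith key "risk." && !(BASE_FIELD_ORDER.contains key)))
    (fun x => x) false
  BASE_FIELD_ORDER ++ risk_extras ++ other_extras

-- ===== PORT B =====
-- loop body: one branch appends k to risk or other (and skips adjacent duplicates and base
-- keys); prev is updated to k on every iteration, exactly as in Source B.
def build_field_order_alt (rows : List (List (String × String))) : List String :=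
  let base := PySem.Set.ofList BASE_FIELD_ORDER
  let keys := PySem.List.sorted (rows.flatMap (fun row => row.map Prod.fst)) (fun k => k) false
  let fin := keys.foldl
    (fun (st : List String × List String × Option String) k =>
      if (some k != st.2.2) && !(PySem.Set.contains base k) then
        (if PySem.Str.startswith k "risk." then (st.1 ++ [k], st.2.1, some k)
         else (st.1, st.2.1 ++ [k], some k))
      else (st.1, st.2.1, some k))
    ([], [], none)
  BASE_FIELD_ORDER ++ fin.1 ++ fin.2.1

-- ===== PRECONDITION & SPEC =====
def Spec_build_field_order (rows : List (List (String × String))) (out : List String) : Prop := out = build_field_order_alt rows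
instance (rows : List (List (String × String))) (out : List String) : Decidable (Spec_build_field_order rows out) := by unfold Spec_build_field_order; infer_instance

-- ===== CLAIM (what is proved, stated in full; the proofs are below) =====
def Claim_equal_build_field_order : Prop := ∀ (rows : List (List (String × String))), Dom_build_field_order rows → Spec_build_field_order rows (build_field_order rows)

-- ===== LEMMAS AND PROOFS =====

def pvEm (base : PySem.Set String) : List String → Option String → List String
  | [], _ => []
  | k :: t, prev =>
      (if (some k != prev) && !(PySem.Set.contains base k) then [k] else []) ++ pvEm base t (some k)

lemma pvCond (base : PySem.Set String) (k : String) (prev : Option String) :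
    (((some k != prev) && !(PySem.Set.contains base k)) = true) ↔ (some k ≠ prev ∧ k ∉ base) := by
  rw [Bool.and_eq_true, bne_iff_ne, Bool.not_eq_true']
  constructor
  · rintro ⟨h1, h2⟩
    exact ⟨h1, fun hm => by rw [(PySem.Set.contains_iff base k).2 hm] at h2; cases h2⟩
  · rintro ⟨h1, h2⟩
    refine ⟨h1, ?_⟩
    cases hc : PySem.Set.contains base k
    · rfl
    · exact absurd ((PySem.Set.contains_iff base k).1 hc) h2

lemma pvScan_eq (base : PySem.Set String) (L : List String) :
    ∀ (risk other : List String) (prev : Option String),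
    L.foldl
      (fun (st : List String × List String × Option String) k =>
        if (some k != st.2.2) && !(PySem.Set.contains base k) then
          (if PySem.Str.startswith k "risk." then (st.1 ++ [k], st.2.1, some k)
           else (st.1, st.2.1 ++ [k], some k))
        else (st.1, st.2.1, some k))
      (risk, other, prev)
    = ((risk ++ (pvEm base L prev).filter (fun k => PySem.Str.startswith k "risk."),
        other ++ (pvEm base L prev).filter (fun k => !PySem.Str.startswith k "risk."),
        L.foldl (fun _ k => some k) prev)) := by
  induction L with
  | nil => intro risk other prev; simp [pvEm]
  | cons k t ih =>
      intro risk other prev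
      rw [List.foldl_cons]
      by_cases h : ((some k != prev) && !(PySem.Set.contains base k)) = true
      · by_cases hr : PySem.Str.startswith k "risk." = true
        · simp only [h, hr, if_true]
          rw [ih, pvEm]
          rw [pvCond] at h
          simp [PySem.Str.startswith] at hr
          simp [h, hr, List.append_assoc]
        · rw [Bool.not_eq_true] at hr
          simp only [h, hr, if_true, Bool.false_eq_true, if_false]
          rw [ih, pvEm]
          rw [pvCond] at h
          simp [PySem.Str.startswith] at hr
          simp [h, hr, List.append_assoc]
      · simp only [Bool.not_eq_true] at h
        simp only [h, Bool.false_eq_true, if_false]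
        rw [ih, pvEm]
        rw [Bool.eq_false_iff, Ne, pvCond] at h
        simp [h]

lemma pvEm_spec (base : PySem.Set String) (L : List String)
    (hL : L.Pairwise (fun a b => a ≤ b)) :
    ∀ prev, (∀ y ∈ L, ∀ p, prev = some p → p ≤ y) →
      (pvEm base L prev).Pairwise (fun a b => a < b) ∧
      (∀ p, prev = some p → ∀ y ∈ pvEm base L prev, p < y) ∧
      (∀ x, x ∈ pvEm base L prev ↔ x ∈ L ∧ x ∉ base ∧ ∀ p, prev = some p → x ≠ p) := by
  induction L with
  | nil => intro prev _; simp [pvEm]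
  | cons k t ih =>
      intro prev hprev
      rw [List.pairwise_cons] at hL
      obtain ⟨hk, ht⟩ := hL
      have hprev' : ∀ y ∈ t, ∀ p, some k = some p → p ≤ y := by
        intro y hy p hp; cases hp; exact hk y hy
      obtain ⟨ihP, ihB, ihM⟩ := ih ht (some k) hprev'
      have hpk : ∀ p, prev = some p → p ≤ k := fun p hp => hprev k (by simp) p hp
      refine ⟨?_, ?_, ?_⟩
      · -- Pairwise
        by_cases h : ((some k != prev) && !(PySem.Set.contains base k)) = true
        · simp only [pvEm, h, if_true, List.singleton_append, List.pairwise_cons]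
          exact ⟨fun y hy => ihB k rfl y hy, ihP⟩
        · simp only [pvEm, Bool.not_eq_true] at h ⊢
          simp only [h, Bool.false_eq_true, if_false, List.nil_append]
          exact ihP
      · -- every emitted key is above prev
        intro p hp y hy
        have hple : p ≤ k := hpk p hp
        simp only [pvEm, List.mem_append] at hy
        rcases hy with hy | hy
        · by_cases h : ((some k != prev) && !(PySem.Set.contains base k)) = true
          · simp only [h, if_true, List.mem_singleton] at hy
            subst hy
            rcases lt_or_eq_of_le hple with h' | h'
            · exact h'
            · exfalso
              rw [pvCond] at h
              exact h.1 (by rw [hp, h'])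
          · rw [pvCond] at h
            simp [h] at hy
        · exact lt_of_le_of_lt hple (ihB k rfl y hy)
      · -- membership
        intro x
        simp only [pvEm, List.mem_append, List.mem_cons]
        constructor
        · intro hx
          rcases hx with hx | hx
          · by_cases h : ((some k != prev) && !(PySem.Set.contains base k)) = true
            · simp only [h, if_true, List.mem_singleton] at hx
              subst hx
              rw [pvCond] at h
              exact ⟨Or.inl rfl, h.2, fun p hp hxp => h.1 (by rw [hp, hxp])⟩
            · rw [pvCond] at h
              simp [h] at hx
          · obtain ⟨hxt, hxb, hxk⟩ := (ihM x).1 hx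
            refine ⟨Or.inr hxt, hxb, ?_⟩
            intro p hp hxp
            have hxk' : x ≠ k := hxk k rfl
            have h1 : p ≤ k := hpk p hp
            have h2 : k ≤ x := hk x hxt
            have h3 : x ≤ k := by rw [hxp]; exact h1
            exact hxk' (le_antisymm h3 h2)
        · rintro ⟨hx, hxb, hxp⟩
          have hne : (some x != prev) = true := by
            rw [bne_iff_ne]
            cases prev with
            | none => simp
            | some p => intro he; exact hxp p rfl (Option.some.inj he)
          rcases hx with hx | hx
          · subst hx
            have h : ((some x != prev) && !(PySem.Set.contains base x)) = true := by
              rw [pvCond]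
              exact ⟨bne_iff_ne.mp hne, hxb⟩
            rw [pvCond] at h
            simp [h.1, h.2]
          · by_cases hxk : x = k
            · subst hxk
              have h : ((some x != prev) && !(PySem.Set.contains base x)) = true := by
                rw [pvCond]
                exact ⟨bne_iff_ne.mp hne, hxb⟩
              rw [pvCond] at h
              simp [h.1, h.2]
            · right
              exact (ihM x).2 ⟨hx, hxb, fun p hp => by cases hp; exact hxk⟩

-- Invariant tying A's (seen, extras) state to the ghost set t of the keys processed so far.
def pvInv (st : PySem.Set String × List String) (t : PySem.Set String) : Prop :=
  st.2.Nodup ∧ t.Nodup ∧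
  (∀ x, x ∈ st.1 ↔ x ∈ BASE_FIELD_ORDER ∨ x ∈ t) ∧
  (∀ x, x ∈ st.2 ↔ x ∈ t ∧ x ∉ BASE_FIELD_ORDER)

lemma pvInv_step (st : PySem.Set String × List String) (t : PySem.Set String)
    (h : pvInv st t) (k : String) :
    pvInv (if PySem.Set.contains st.1 k then st
           else (PySem.Set.add st.1 k, st.2 ++ [k])) (PySem.Set.add t k) := by
  obtain ⟨hn, htn, hs, he⟩ := h
  by_cases hk : k ∈ st.1
  · simp only [(PySem.Set.contains_iff _ _).2 hk, if_true]
    by_cases hkt : k ∈ t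
    · rw [PySem.Set.add_of_mem hkt]; exact ⟨hn, htn, hs, he⟩
    · rw [PySem.Set.add_of_not_mem hkt]
      have hkb : k ∈ BASE_FIELD_ORDER := by
        rcases (hs k).1 hk with h | h
        · exact h
        · exact absurd h hkt
      refine ⟨hn, List.Nodup.append htn (List.nodup_singleton k) ?_, ?_, ?_⟩
      · intro a ha hb; simp at hb; subst hb; exact hkt ha
      · intro x
        rw [hs x]; simp only [List.mem_append, List.mem_singleton]
        constructor
        · rintro (h | h)
          · exact Or.inl h
          · exact Or.inr (Or.inl h)
        · rintro (h | h | h)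
          · exact Or.inl h
          · exact Or.inr h
          · subst h; exact Or.inl hkb
      · intro x
        rw [he x]; simp only [List.mem_append, List.mem_singleton]
        constructor
        · rintro ⟨h1, h2⟩; exact ⟨Or.inl h1, h2⟩
        · rintro ⟨h1 | h1, h2⟩
          · exact ⟨h1, h2⟩
          · subst h1; exact absurd hkb h2
  · have hct : PySem.Set.contains st.1 k = false := by
      cases hc : PySem.Set.contains st.1 k
      · rfl
      · exact absurd ((PySem.Set.contains_iff _ _).1 hc) hk
    simp only [hct, Bool.false_eq_true, if_false]
    have hkt : k ∉ t := fun h => hk ((hs k).2 (Or.inr h))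
    have hkb : k ∉ BASE_FIELD_ORDER := fun h => hk ((hs k).2 (Or.inl h))
    have hke : k ∉ st.2 := fun h => hkt ((he k).1 h).1
    rw [PySem.Set.add_of_not_mem hkt]
    refine ⟨?_, ?_, ?_, ?_⟩
    · exact List.Nodup.append hn (List.nodup_singleton k)
        (by intro a ha hb; simp at hb; subst hb; exact hke ha)
    · exact List.Nodup.append htn (List.nodup_singleton k)
        (by intro a ha hb; simp at hb; subst hb; exact hkt ha)
    · intro x
      rw [PySem.Set.mem_add, hs x]
      simp only [List.mem_append, List.mem_singleton]
      tauto
    · intro x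
      simp only [List.mem_append, List.mem_singleton, he x]
      constructor
      · rintro (⟨h1, h2⟩ | h)
        · exact ⟨Or.inl h1, h2⟩
        · subst h; exact ⟨Or.inr rfl, hkb⟩
      · rintro ⟨h1 | h1, h2⟩
        · exact Or.inl ⟨h1, h2⟩
        · exact Or.inr h1

lemma pvInv_keys (st : PySem.Set String × List String) (t : PySem.Set String)
    (h : pvInv st t) (ks : List String) :
    pvInv (ks.foldl (fun st key =>
            if PySem.Set.contains st.1 key then st
            else (PySem.Set.add st.1 key, st.2 ++ [key])) st)
          (PySem.Set.update t ks) := by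
  induction ks generalizing st t with
  | nil => exact h
  | cons k ks ih =>
      rw [PySem.Set.update_cons]
      exact ih _ _ (pvInv_step st t h k)

lemma pvInv_rows (rows : List (List (String × String)))
    (st : PySem.Set String × List String) (t : PySem.Set String) (h : pvInv st t) :
    pvInv (rows.foldl (fun st row =>
            (row.map Prod.fst).foldl (fun st key =>
              if PySem.Set.contains st.1 key then st
              else (PySem.Set.add st.1 key, st.2 ++ [key])) st) st)
          (rows.foldl (fun s row => PySem.Set.update s (row.map Prod.fst)) t) := by
  induction rows generalizing st t with
  | nil => exact h
  | cons r rs ih => exact ih _ _ (pvInv_keys st t h (r.map Prod.fst))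

-- membership in the ghost set = membership in the flattened key list
lemma pvMem_fold_update (rows : List (List (String × String))) (t : PySem.Set String) (x : String) :
    x ∈ rows.foldl (fun s row => PySem.Set.update s (row.map Prod.fst)) t ↔
      x ∈ t ∨ x ∈ rows.flatMap (fun row => row.map Prod.fst) := by
  induction rows generalizing t with
  | nil => simp
  | cons r rs ih =>
      rw [List.foldl_cons, ih, PySem.Set.mem_update]
      simp only [List.flatMap_cons, List.mem_append]
      tauto

-- ===== VERDICT (by name: the statement is the Claim_ definition above) =====
theorem build_field_order_spec : Claim_equal_build_field_order := by
  intro rows _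
  unfold Spec_build_field_order build_field_order build_field_order_alt
  have hinv : pvInv (PySem.Set.ofList BASE_FIELD_ORDER, ([] : List String)) PySem.Set.empty := by
    refine ⟨List.nodup_nil, List.nodup_nil, ?_, ?_⟩
    · intro x; simp [PySem.Set.mem_ofList, PySem.Set.empty]
    · intro x; simp [PySem.Set.empty]
  have H := pvInv_rows rows _ _ hinv
  set stA := rows.foldl (fun st row =>
      (row.map Prod.fst).foldl (fun st key =>
        if PySem.Set.contains st.1 key then st
        else (PySem.Set.add st.1 key, st.2 ++ [key])) st)
      (PySem.Set.ofList BASE_FIELD_ORDER, ([] : List String)) with hstA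
  set tG := rows.foldl (fun s row => PySem.Set.update s (row.map Prod.fst)) PySem.Set.empty with htG
  obtain ⟨hen, _, _, he⟩ := H
  set flat := rows.flatMap (fun row => row.map Prod.fst) with hflat
  set L := PySem.List.sorted flat (fun k => k) false with hL
  have hLp : L.Pairwise (fun a b => a ≤ b) := PySem.List.sorted_pairwise flat (fun k => k)
  obtain ⟨hEp, _, hEm⟩ := pvEm_spec (PySem.Set.ofList BASE_FIELD_ORDER) L hLp none (by simp)
  have htGm : ∀ x, x ∈ tG ↔ x ∈ flat := by
    intro x
    rw [htG, pvMem_fold_update]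
    simp only [PySem.Set.empty, List.not_mem_nil, false_or]
    rw [hflat]
  have hEmem : ∀ x, x ∈ pvEm (PySem.Set.ofList BASE_FIELD_ORDER) L none ↔
      x ∈ flat ∧ x ∉ BASE_FIELD_ORDER := by
    intro x
    rw [hEm x, hL, PySem.List.mem_sorted, PySem.Set.mem_ofList]
    constructor
    · rintro ⟨h1, h2, _⟩; exact ⟨h1, h2⟩
    · rintro ⟨h1, h2⟩; exact ⟨h1, h2, fun p hp => nomatch hp⟩
  have hEnd : (pvEm (PySem.Set.ofList BASE_FIELD_ORDER) L none).Nodup :=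
    hEp.imp (fun h => ne_of_lt h)
  have key : ∀ p : String → Bool,
      PySem.List.sorted (stA.2.filter (fun k => p k && !(BASE_FIELD_ORDER.contains k))) (fun x => x) false
        = (pvEm (PySem.Set.ofList BASE_FIELD_ORDER) L none).filter p := by
    intro p
    apply PySem.List.sorted_eq_of_perm_of_pairwise_lt
    · rw [List.perm_ext_iff_of_nodup (List.Nodup.filter _ hEnd) (List.Nodup.filter _ hen)]
      intro x
      simp only [List.mem_filter, hEmem x, he x, htGm x, Bool.and_eq_true, Bool.not_eq_true',
        List.contains_eq_mem, decide_eq_false_iff_not]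
      tauto
    · exact List.Pairwise.sublist List.filter_sublist hEp
  simp only [pvScan_eq, List.nil_append, key (fun k => PySem.Str.startswith k "risk."),
    key (fun k => !PySem.Str.startswith k "risk.")]
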